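-- pv_equiv track=rewrite | github.com/Wlodarz03/UWR | Wdi/Lista 4/Zadanie 7 i 8.py | podobne
-- ===== SOURCE A (Python) =====
-- def oc(n):
--     wystapienia = [0,0,0,0,0,0,0,0,0,0]
--     while n>0:
--         i = n % 10
--         wystapienia[i]+=1
--         n = n//10
--     return wystapienia
--
-- def podobne(n,m):
--     x=oc(n)
--     y=oc(m)
--     o=0
--     for i in range(10):
--         if x[i]==y[i]:
--             o+=1
--         else:
--             return 0
--     if o==10:
--         return 1
-- ===== SOURCE B (Python) =====
-- def _digits(k):
--     ds = []
--     while k > 0: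
--         ds.append(k % 10)
--         k //= 10
--     return ds
--
-- def podobne(n, m):
--     return 1 if sorted(_digits(n)) == sorted(_digits(m)) else 0
-- ===== Notes on version B (the rewrite author's own statement) =====
-- stated objective: alternative
-- what changed: B replaces the 10-slot frequency-table build plus slot-by-slot comparison with extracting each number's digit list and comparing the two sorted digit lists (multiset equality by sort-and-compare).
import Mathlib
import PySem

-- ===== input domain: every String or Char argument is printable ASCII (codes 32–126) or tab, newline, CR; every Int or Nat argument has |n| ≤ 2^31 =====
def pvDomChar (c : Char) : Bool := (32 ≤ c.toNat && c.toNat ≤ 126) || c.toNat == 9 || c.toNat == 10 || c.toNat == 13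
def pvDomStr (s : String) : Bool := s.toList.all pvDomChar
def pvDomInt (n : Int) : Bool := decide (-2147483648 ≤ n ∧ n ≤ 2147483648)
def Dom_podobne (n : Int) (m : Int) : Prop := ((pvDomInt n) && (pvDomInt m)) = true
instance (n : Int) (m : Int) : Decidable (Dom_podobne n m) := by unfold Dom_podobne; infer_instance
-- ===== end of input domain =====

-- B replaces A's 10-slot frequency table + slot comparison by sort-and-compare of the digit lists; same behaviour, alternative algorithm.

-- ===== PORT A =====
-- the while-loop of oc: wystapienia[i] += 1 with i = n % 10 ∈ [0,10) (always in range for n > 0)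
def ocLoop (n : Int) (w : List Int) : List Int :=
  if h : n > 0 then
    ocLoop (PySem.Int.floordiv n 10)
      (w.set (PySem.Int.mod n 10).toNat (w.getD (PySem.Int.mod n 10).toNat 0 + 1))
  else w
termination_by n.toNat
decreasing_by
  have h10 : PySem.Int.floordiv n 10 = n / 10 := PySem.Int.floordiv_eq_ediv_of_pos (by omega)
  rw [h10]; omega

def oc (n : Int) : List Int := ocLoop n [0,0,0,0,0,0,0,0,0,0]

-- the for-i-in-range(10) loop of podobne; the final else 0 is Python's implicit
-- fall-through, unreachable because a completed loop always has o = 10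
def podLoop (x y : List Int) (idxs : List Int) (o : Int) : Int :=
  match idxs with
  | [] => if o == 10 then 1 else 0
  | i :: rest =>
      if x.getD i.toNat 0 == y.getD i.toNat 0 then podLoop x y rest (o + 1) else 0

def podobne (n : Int) (m : Int) : Int :=
  podLoop (oc n) (oc m) (PySem.List.pyRange 0 10 1) 0

-- ===== PORT B =====
def digitsOf (k : Int) : List Int :=
  if h : k > 0 then PySem.Int.mod k 10 :: digitsOf (PySem.Int.floordiv k 10) else []
termination_by k.toNat
decreasing_by
  have h10 : PySem.Int.floordiv k 10 = k / 10 := PySem.Int.floordiv_eq_ediv_of_pos (by omega)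
  rw [h10]; omega

def podobne_alt (n : Int) (m : Int) : Int :=
  if PySem.List.sorted (digitsOf n) (fun x => x) false
       = PySem.List.sorted (digitsOf m) (fun x => x) false then 1 else 0

-- ===== PRECONDITION & SPEC =====
def Spec_podobne (n : Int) (m : Int) (out : Int) : Prop := out = podobne_alt n m
instance (n : Int) (m : Int) (out : Int) : Decidable (Spec_podobne n m out) := by unfold Spec_podobne; infer_instance

-- ===== CLAIM (what is proved, stated in full; the proofs are below) =====
def Claim_equal_podobne : Prop := ∀ (n : Int) (m : Int), Dom_podobne n m → Spec_podobne n m (podobne n m)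

-- ===== LEMMAS AND PROOFS =====

-- A's table loop is the fold of the increment over B's digit list
theorem ocLoop_eq_foldl (n : Int) (w : List Int) :
    ocLoop n w = (digitsOf n).foldl (fun w i => w.set i.toNat (w.getD i.toNat 0 + 1)) w := by
  rw [ocLoop, digitsOf]
  split
  · rw [ocLoop_eq_foldl]; simp
  · simp
termination_by n.toNat
decreasing_by
  have h10 : PySem.Int.floordiv n 10 = n / 10 := PySem.Int.floordiv_eq_ediv_of_pos (by omega)
  rw [h10]; omega

theorem digitsOf_mem_range (n : Int) : ∀ d ∈ digitsOf n, 0 ≤ d ∧ d < 10 := by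
  rw [digitsOf]
  split
  · rename_i h
    intro d hd
    rw [List.mem_cons] at hd
    rcases hd with hd | hd
    · have := PySem.Int.mod_eq_emod_of_pos (a := n) (b := 10) (by omega)
      subst hd; rw [this]; omega
    · exact digitsOf_mem_range _ d hd
  · simp
termination_by n.toNat
decreasing_by
  have h10 : PySem.Int.floordiv n 10 = n / 10 := PySem.Int.floordiv_eq_ediv_of_pos (by omega)
  rw [h10]; omega

theorem foldl_set_length (ds : List Int) (w : List Int) :
    (ds.foldl (fun w i => w.set i.toNat (w.getD i.toNat 0 + 1)) w).length = w.length := by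
  induction ds generalizing w with
  | nil => rfl
  | cons d t ih => rw [List.foldl_cons, ih, List.length_set]

theorem oc_length (n : Int) : (oc n).length = 10 := by
  rw [oc, ocLoop_eq_foldl, foldl_set_length]; rfl

theorem foldl_set_getD (ds : List Int) (w : List Int) (j : Nat) (hj : j < w.length)
    (hds : ∀ d ∈ ds, 0 ≤ d ∧ d < w.length) :
    (ds.foldl (fun w i => w.set i.toNat (w.getD i.toNat 0 + 1)) w).getD j 0
      = w.getD j 0 + (ds.count (j : Int) : Int) := by
  induction ds generalizing w with
  | nil => simp
  | cons d t ih =>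
    have hd := hds d (by simp)
    have hdn : d.toNat < w.length := by omega
    rw [List.foldl_cons, ih _ (by simpa using hj) (by intro e he; simpa using hds e (by simp [he]))]
    by_cases hdj : d.toNat = j
    · have hdj' : d = (j : Int) := by omega
      simp [hdj, hdj', List.getD, List.getElem?_set, hj, List.count_cons]
      ring
    · have hdj' : d ≠ (j : Int) := by omega
      simp [List.getD, List.getElem?_set, hdj, List.count_cons, hdj']

theorem oc_getD (n : Int) (j : Nat) (hj : j < 10) :
    (oc n).getD j 0 = ((digitsOf n).count (j : Int) : Int) := by
  rw [oc, ocLoop_eq_foldl, foldl_set_getD _ _ _ (by simpa using hj)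
    (by intro d hd; have := digitsOf_mem_range n d hd; constructor <;> [exact this.1; simpa using this.2])]
  have hz : ([0,0,0,0,0,0,0,0,0,0] : List Int).getD j 0 = 0 := by interval_cases j <;> rfl
  rw [hz]; ring

theorem oc_eq_iff_perm (n m : Int) : oc n = oc m ↔ (digitsOf n).Perm (digitsOf m) := by
  constructor
  · intro h
    rw [List.perm_iff_count]
    intro v
    by_cases hv : 0 ≤ v ∧ v < 10
    · have h1 := oc_getD n v.toNat (by omega)
      have h2 := oc_getD m v.toNat (by omega)
      have hvv : ((v.toNat : Nat) : Int) = v := by omega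
      rw [hvv] at h1 h2
      have : (oc n).getD v.toNat 0 = (oc m).getD v.toNat 0 := by rw [h]
      rw [h1, h2] at this
      exact_mod_cast this
    · have h1 : (digitsOf n).count v = 0 := by
        rw [List.count_eq_zero]
        intro hmem; have := digitsOf_mem_range n v hmem; omega
      have h2 : (digitsOf m).count v = 0 := by
        rw [List.count_eq_zero]
        intro hmem; have := digitsOf_mem_range m v hmem; omega
      rw [h1, h2]
  · intro h
    apply List.ext_getElem (by rw [oc_length, oc_length])
    intro j hj _
    have hj10 : j < 10 := by simpa [oc_length] using hj
    have h1 : (oc n).getD j 0 = (oc n)[j] := List.getD_eq_getElem _ _ hj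
    have h2 : (oc m).getD j 0 = (oc m)[j]'(by rw [oc_length]; exact hj10) :=
      List.getD_eq_getElem _ _ (by rw [oc_length]; exact hj10)
    rw [← h1, ← h2, oc_getD n j hj10, oc_getD m j hj10, List.Perm.count_eq h]

set_option maxHeartbeats 1000000 in
theorem podLoop_ten (a0 a1 a2 a3 a4 a5 a6 a7 a8 a9 b0 b1 b2 b3 b4 b5 b6 b7 b8 b9 : Int) :
    podLoop [a0,a1,a2,a3,a4,a5,a6,a7,a8,a9] [b0,b1,b2,b3,b4,b5,b6,b7,b8,b9]
      (PySem.List.pyRange 0 10 1) 0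
    = if ([a0,a1,a2,a3,a4,a5,a6,a7,a8,a9] : List Int) = [b0,b1,b2,b3,b4,b5,b6,b7,b8,b9]
      then 1 else 0 := by
  have hr : PySem.List.pyRange 0 10 1 = [0,1,2,3,4,5,6,7,8,9] := by decide
  rw [hr]
  simp only [podLoop]
  norm_num [List.getD]
  split_ifs <;> simp_all

theorem exists_ten (x : List Int) (hx : x.length = 10) :
    ∃ a0 a1 a2 a3 a4 a5 a6 a7 a8 a9 : Int, x = [a0,a1,a2,a3,a4,a5,a6,a7,a8,a9] := by
  rcases x with _ | ⟨a0, _ | ⟨a1, _ | ⟨a2, _ | ⟨a3, _ | ⟨a4, _ | ⟨a5, _ | ⟨a6, _ | ⟨a7, _ | ⟨a8, _ | ⟨a9, _ | ⟨a10, t⟩⟩⟩⟩⟩⟩⟩⟩⟩⟩⟩ <;>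
    simp_all

theorem podobne_eq_if (n m : Int) : podobne n m = if oc n = oc m then 1 else 0 := by
  obtain ⟨a0,a1,a2,a3,a4,a5,a6,a7,a8,a9,hx⟩ := exists_ten (oc n) (oc_length n)
  obtain ⟨b0,b1,b2,b3,b4,b5,b6,b7,b8,b9,hy⟩ := exists_ten (oc m) (oc_length m)
  rw [podobne, hx, hy, podLoop_ten]

-- ===== VERDICT (by name: the statement is the Claim_ definition above) =====
theorem podobne_spec : Claim_equal_podobne := by
  intro n m _
  unfold Spec_podobne podobne_alt
  rw [podobne_eq_if]
  simp only [oc_eq_iff_perm, ← PySem.List.sorted_id_eq_sorted_id_iff_perm]
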